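-- pv_equiv track=rewrite | github.com/ootakazuhiko/competitive_programming_book | analyze_unused_svgs.py | categorize_unused_diagrams
-- ===== SOURCE A (Python) =====
-- def categorize_unused_diagrams(unused_diagrams):
--     """Categorize unused diagrams by chapter and type."""
--     by_chapter = {}
--
--     for diagram in unused_diagrams:
--         # Extract chapter from path like "diagrams/chapterX/figure..."
--         parts = diagram.split('/')
--         if len(parts) >= 2:
--             chapter = parts[1]
--             if chapter not in by_chapter:
--                 by_chapter[chapter] = []
--             by_chapter[chapter].append(diagram)
--
--     return by_chapter
-- ===== SOURCE B (Python) =====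
-- def categorize_unused_diagrams(unused_diagrams):
--     """Categorize unused diagrams by chapter and type."""
--     pairs = [(d.split('/')[1], d) for d in unused_diagrams if len(d.split('/')) >= 2]
--     keys = list(dict.fromkeys(ch for ch, _ in pairs))
--     return {ch: [d for c, d in pairs if c == ch] for ch in keys}
-- ===== Notes on version B (the rewrite author's own statement) =====
-- stated objective: alternative
-- what changed: Replaces the single insert-or-append dict loop by a declarative pipeline: extract (chapter, path) pairs once, dedupe the chapters in first-occurrence order with dict.fromkeys, then build each chapter's list by a per-chapter filter over the pairs.
import Mathlib
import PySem

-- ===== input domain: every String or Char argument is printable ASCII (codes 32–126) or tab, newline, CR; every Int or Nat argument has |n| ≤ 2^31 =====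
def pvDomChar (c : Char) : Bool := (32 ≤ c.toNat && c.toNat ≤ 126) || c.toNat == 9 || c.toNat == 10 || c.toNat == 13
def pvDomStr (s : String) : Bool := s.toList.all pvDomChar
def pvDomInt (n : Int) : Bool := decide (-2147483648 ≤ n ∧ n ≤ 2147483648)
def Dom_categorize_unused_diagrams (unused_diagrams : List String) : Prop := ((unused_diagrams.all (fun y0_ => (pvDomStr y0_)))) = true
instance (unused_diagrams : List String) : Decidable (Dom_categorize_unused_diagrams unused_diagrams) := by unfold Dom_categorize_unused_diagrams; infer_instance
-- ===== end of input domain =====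

-- B replaces A's single insert-or-append dict loop by a pairs/dedup/per-chapter-filter pipeline (objective: alternative, same results).

-- ===== PORT A =====
def categorize_unused_diagrams (unused_diagrams : List String) : List (String × List String) :=
  (unused_diagrams.foldl
    (fun (by_chapter : PySem.Dict String (List String)) diagram =>
      let parts := (PySem.Str.split? diagram "/").getD []
      if 2 ≤ parts.length then
        let chapter := PySem.List.pyGetD parts 1 ""
        let by_chapter := if by_chapter.contains chapter then by_chapter else by_chapter.insert chapter []
        by_chapter.modify chapter [] (fun l => l ++ [diagram])
      else by_chapter)
    PySem.Dict.empty).items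

-- ===== PORT B =====
def categorize_unused_diagrams_alt (unused_diagrams : List String) : List (String × List String) :=
  let pairs := unused_diagrams.filterMap (fun d =>
    if 2 ≤ ((PySem.Str.split? d "/").getD []).length then
      some (PySem.List.pyGetD ((PySem.Str.split? d "/").getD []) 1 "", d)
    else none)
  let keys := PySem.List.dedup (pairs.map (fun p => p.1))
  keys.map (fun ch => (ch, (pairs.filter (fun p => p.1 == ch)).map (fun p => p.2)))

-- ===== PRECONDITION & SPEC =====
def Spec_categorize_unused_diagrams (unused_diagrams : List String) (out : List (String × List String)) : Prop := out = categorize_unused_diagrams_alt unused_diagrams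
instance (unused_diagrams : List String) (out : List (String × List String)) : Decidable (Spec_categorize_unused_diagrams unused_diagrams out) := by unfold Spec_categorize_unused_diagrams; infer_instance

-- ===== CLAIM (what is proved, stated in full; the proofs are below) =====
def Claim_equal_categorize_unused_diagrams : Prop := ∀ (unused_diagrams : List String), Dom_categorize_unused_diagrams unused_diagrams → Spec_categorize_unused_diagrams unused_diagrams (categorize_unused_diagrams unused_diagrams)

-- ===== LEMMAS AND PROOFS =====

-- the (chapter, path) extraction both programs perform
def pvPair? (d : String) : Option (String × String) :=
  if 2 ≤ ((PySem.Str.split? d "/").getD []).length then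
    some (PySem.List.pyGetD ((PySem.Str.split? d "/").getD []) 1 "", d)
  else none

-- A's insert-if-absent-then-append step is exactly Dict.modify with default []
theorem pv_step_eq_modify {ν : Type} (d : PySem.Dict String (List ν)) (k : String)
    (f : List ν → List ν) :
    (if d.contains k then d else d.insert k []).modify k [] f = d.modify k [] f := by
  by_cases h : d.contains k
  · simp [h]
  · have h' : d.contains k = false := by simpa using h
    rw [if_neg (by simp [h'])]
    simp [PySem.Dict.modify, PySem.Dict.getD_insert_self, PySem.Dict.insert_insert_self,
      PySem.Dict.getD_of_not_contains, h']

-- A's loop over the raw paths is the modify-fold over the extracted pairs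
theorem pv_foldA_eq (ds : List String) (d0 : PySem.Dict String (List String)) :
    ds.foldl
      (fun (by_chapter : PySem.Dict String (List String)) diagram =>
        let parts := (PySem.Str.split? diagram "/").getD []
        if 2 ≤ parts.length then
          let chapter := PySem.List.pyGetD parts 1 ""
          let by_chapter := if by_chapter.contains chapter then by_chapter else by_chapter.insert chapter []
          by_chapter.modify chapter [] (fun l => l ++ [diagram])
        else by_chapter) d0
    = (ds.filterMap pvPair?).foldl (fun d p => d.modify p.1 [] (fun l => l ++ [p.2])) d0 := by
  induction ds generalizing d0 with
  | nil => rfl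
  | cons x xs ih =>
    by_cases h : 2 ≤ ((PySem.Str.split? x "/").getD []).length
    · simp only [List.foldl_cons, List.filterMap_cons, pvPair?, h, if_true]
      rw [ih, pv_step_eq_modify]
      rfl
    · simp only [List.foldl_cons, List.filterMap_cons, pvPair?, h, if_false]
      exact ih d0

-- the modify-fold from the empty dict yields exactly B's dedup/filter table
theorem pv_grouped (P : List (String × String)) :
    ((P.foldl (fun d p => d.modify p.1 [] (fun l => l ++ [p.2])) PySem.Dict.empty).items : List (String × List String))
    = (PySem.List.dedup (P.map (fun p => p.1))).map
        (fun ch => (ch, (P.filter (fun p => p.1 == ch)).map (fun p => p.2))) := by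
  have hnd : (P.foldl (fun d p => d.modify p.1 [] (fun l => l ++ [p.2])) PySem.Dict.empty).keys.Nodup := by
    have := PySem.Dict.nodup_keys_foldl_modify_key (l := P) (key := Prod.fst) (d0 := [])
      (f := fun _ p v => v ++ [p.2]) (d := (PySem.Dict.empty : PySem.Dict String (List String)))
      (by simp [PySem.Dict.keys_empty])
    simpa using this
  rw [PySem.Dict.items_eq_map_keys _ hnd []]
  have hk : (P.foldl (fun d p => d.modify p.1 [] (fun l => l ++ [p.2])) PySem.Dict.empty).keys
      = PySem.Set.update ([] : List String) (P.map Prod.fst) := by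
    have := PySem.Dict.keys_foldl_modify_key (l := P) (key := Prod.fst) (d0 := ([] : List String))
      (f := fun _ p v => v ++ [p.2]) (d := (PySem.Dict.empty : PySem.Dict String (List String)))
    simpa [PySem.Dict.keys_empty] using this
  rw [hk]
  have hset : PySem.Set.update ([] : List String) (P.map Prod.fst)
      = PySem.List.dedup (P.map (fun p => p.1)) := by
    rw [PySem.List.dedup_eq_ofList]
    rfl
  rw [hset]
  refine List.map_congr_left (fun k _ => ?_)
  have hg := PySem.Dict.getD_foldl_modify_append P (PySem.Dict.empty : PySem.Dict String (List String)) k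
  simp [PySem.Dict.getD_empty] at hg
  simp [hg]

-- ===== VERDICT (by name: the statement is the Claim_ definition above) =====
theorem categorize_unused_diagrams_spec : Claim_equal_categorize_unused_diagrams := by
  intro ds _
  unfold Spec_categorize_unused_diagrams categorize_unused_diagrams categorize_unused_diagrams_alt
  rw [pv_foldA_eq]
  exact pv_grouped (ds.filterMap pvPair?)
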